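-- pv_equiv track=rewrite | github.com/Konstantin-Bogdanoski/VI | Exam_Exercises/ZadachaSoKlikanje_lol.py | clickOnPosition
-- ===== SOURCE A (Python) =====
-- def clickOnPosition(position, state):
--     tempState = list()
--
--     for i in state:
--         tempRow = list(i)
--         tempState.append(tempRow)
--
--     for i in range(len(state)):
--         tempRow = list(state[i])
--         for j in range(len(tempRow)):
--             if(position[0] == i and position[1] == j):
--                 tempState[i][j] = tempState[i][j] * (-1)
--                 if(i != 0):
--                     tempState[i - 1][j] = tempState[i-1][j] * (-1)
--                 if(i < len(state) - 1):
--                     tempState[i + 1][j] = tempState[i + 1][j] * (-1)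
--                 if(j != 0):
--                     tempState[i][j - 1] = tempState[i][j - 1] * (-1)
--                 if(j < len(tempRow) - 1):
--                     tempState[i][j + 1] = tempState[i][j + 1] * (-1)
--
--     theTuple = list()
--     for i in tempState:
--         tempRow = tuple(i)
--         theTuple.append(tempRow)
--
--     return tuple(theTuple)
-- ===== SOURCE B (Python) =====
-- def clickOnPosition(position, state):
--     temp = [list(row) for row in state]
--     i, j = position
--     if 0 <= i < len(temp) and 0 <= j < len(temp[i]):
--         for di, dj in ((0, 0), (-1, 0), (1, 0), (0, -1), (0, 1)):
--             ni, nj = i + di, j + dj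
--             if 0 <= ni < len(temp) and 0 <= nj < len(temp[ni]):
--                 temp[ni][nj] = -temp[ni][nj]
--     return tuple(tuple(row) for row in temp)
-- ===== Notes on version B (the rewrite author's own statement) =====
-- stated objective: simpler
-- what changed: B drops A's full-grid double loop that compares every cell against position and instead bounds-checks position directly, then toggles the cell and its existing orthogonal neighbors in one pass over five (di,dj) offsets.
import Mathlib
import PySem

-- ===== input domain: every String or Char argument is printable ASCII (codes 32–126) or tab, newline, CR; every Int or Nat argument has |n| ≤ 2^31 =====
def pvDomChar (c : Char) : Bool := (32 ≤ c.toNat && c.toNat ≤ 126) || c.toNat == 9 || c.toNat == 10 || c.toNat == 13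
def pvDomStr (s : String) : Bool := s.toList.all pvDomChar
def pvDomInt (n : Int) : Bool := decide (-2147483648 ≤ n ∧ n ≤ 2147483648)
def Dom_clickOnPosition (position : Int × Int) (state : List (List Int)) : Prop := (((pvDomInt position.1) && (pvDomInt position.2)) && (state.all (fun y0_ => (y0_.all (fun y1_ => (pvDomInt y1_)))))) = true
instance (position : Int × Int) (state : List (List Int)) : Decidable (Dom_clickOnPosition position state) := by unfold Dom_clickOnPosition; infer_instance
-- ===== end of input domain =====

-- B replaces A's full-grid search loop for the clicked cell by a direct bounds check on
-- `position` followed by one pass over the five (di,dj) offsets (objective: simpler).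

-- ===== PORT A =====
-- tempState[i][j] = tempState[i][j] * (-1): exact for the in-range indices A uses inside Pre_
def pvASet (g : List (List Int)) (i j : Nat) : List (List Int) :=
  g.set i ((g.getD i []).set j (((g.getD i []).getD j 0) * (-1)))

def clickOnPosition (position : Int × Int) (state : List (List Int)) : List (List Int) :=
  let tempState := state.map (fun i => i)
  let tempState := (List.range state.length).foldl (fun ts i =>
    let tempRow := state.getD i []
    (List.range tempRow.length).foldl (fun ts (j : Nat) =>
      if position.1 = (i : Int) ∧ position.2 = (j : Int) then
        let ts := pvASet ts i j
        let ts := if i ≠ 0 then pvASet ts (i - 1) j else ts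
        let ts := if (i : Int) < (state.length : Int) - 1 then pvASet ts (i + 1) j else ts
        let ts := if j ≠ 0 then pvASet ts i (j - 1) else ts
        let ts := if (j : Int) < (tempRow.length : Int) - 1 then pvASet ts i (j + 1) else ts
        ts
      else ts) ts) tempState
  tempState

-- ===== PORT B =====
-- temp[ni][nj] = -temp[ni][nj]: exact for the in-range indices B's guard admits
def pvBNeg (g : List (List Int)) (i j : Nat) : List (List Int) :=
  g.set i ((g.getD i []).set j (-((g.getD i []).getD j 0)))

-- the loop body: toggle (i+di, j+dj) when that cell exists
def pvBStep (i j : Int) (t : List (List Int)) (d : Int × Int) : List (List Int) :=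
  let ni := i + d.1
  let nj := j + d.2
  if 0 ≤ ni ∧ ni < (t.length : Int) ∧ 0 ≤ nj ∧ nj < ((t.getD ni.toNat []).length : Int) then
    pvBNeg t ni.toNat nj.toNat
  else t

def clickOnPosition_alt (position : Int × Int) (state : List (List Int)) : List (List Int) :=
  let temp := state.map (fun row => row)
  let i := position.1
  let j := position.2
  if 0 ≤ i ∧ i < (temp.length : Int) ∧ 0 ≤ j ∧ j < ((temp.getD i.toNat []).length : Int) then
    [((0 : Int), (0 : Int)), (-1, 0), (1, 0), (0, -1), (0, 1)].foldl (pvBStep i j) temp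
  else temp

-- ===== PRECONDITION & SPEC =====
-- Pre_ excludes exactly the ragged grids on which A raises IndexError: a clicked cell in
-- bounds whose column does not exist in the row above or below.
def Pre_clickOnPosition (position : Int × Int) (state : List (List Int)) : Prop :=
  (0 ≤ position.1 ∧ position.1 < (state.length : Int) ∧ 0 ≤ position.2 ∧
      position.2 < ((state.getD position.1.toNat []).length : Int)) →
    ((0 < position.1 → position.2 < ((state.getD (position.1.toNat - 1) []).length : Int)) ∧
     (position.1 < (state.length : Int) - 1 → position.2 < ((state.getD (position.1.toNat + 1) []).length : Int)))
instance (position : Int × Int) (state : List (List Int)) : Decidable (Pre_clickOnPosition position state) := by unfold Pre_clickOnPosition; infer_instance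

def pvWitness_clickOnPosition : (Int × Int) × List (List Int) := ((1, 1), [[1, 2, 3], [4, 5, 6], [7, 8, 9]])

def Spec_clickOnPosition (position : Int × Int) (state : List (List Int)) (out : List (List Int)) : Prop := out = clickOnPosition_alt position state
instance (position : Int × Int) (state : List (List Int)) (out : List (List Int)) : Decidable (Spec_clickOnPosition position state out) := by unfold Spec_clickOnPosition; infer_instance

-- ===== CLAIM (what is proved, stated in full; the proofs are below) =====
def Claim_equal_clickOnPosition : Prop := ∀ (position : Int × Int) (state : List (List Int)), Dom_clickOnPosition position state → Pre_clickOnPosition position state → Spec_clickOnPosition position state (clickOnPosition position state)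
-- ===== LEMMAS AND PROOFS =====

theorem foldl_range_id {S : Type} (n : Nat) (f : S → Nat → S) (s : S)
    (h : ∀ s i, i < n → f s i = s) : (List.range n).foldl f s = s := by
  induction n generalizing s with
  | zero => simp
  | succ m ih =>
    rw [List.range_succ, List.foldl_append]
    rw [ih _ (fun s i hi => h s i (Nat.lt_succ_of_lt hi))]
    simpa using h s m (Nat.lt_succ_self m)

theorem foldl_range_single {S : Type} (n k : Nat) (hk : k < n) (f : S → Nat → S) (s : S)
    (h : ∀ s i, i < n → i ≠ k → f s i = s) : (List.range n).foldl f s = f s k := by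
  induction n generalizing s with
  | zero => omega
  | succ m ih =>
    rw [List.range_succ, List.foldl_append]
    simp only [List.foldl_cons, List.foldl_nil]
    by_cases hkm : k = m
    · subst hkm
      rw [foldl_range_id k f s (fun s i hi => h s i (Nat.lt_succ_of_lt hi) (Nat.ne_of_lt hi))]
    · rw [h _ m (Nat.lt_succ_self m) (fun he => hkm he.symm)]
      exact ih (by omega) s (fun s i hi hik => h s i (Nat.lt_succ_of_lt hi) hik)

theorem pvASet_eq_pvBNeg (g : List (List Int)) (i j : Nat) : pvASet g i j = pvBNeg g i j := by
  simp [pvASet, pvBNeg, mul_comm]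

theorem len_pvBNeg (g : List (List Int)) (i j : Nat) : (pvBNeg g i j).length = g.length := by
  simp [pvBNeg]

theorem row_len_pvBNeg (g : List (List Int)) (i j k : Nat) :
    ((pvBNeg g i j).getD k []).length = (g.getD k []).length := by
  unfold pvBNeg
  by_cases hk : k = i
  · subst hk
    by_cases hi : k < g.length
    · simp [List.getD, hi]
    · simp [List.getD, hi]
  · simp [List.getD, Ne.symm hk]

theorem pvBStep_center (t : List (List Int)) (ai bj : Nat) (h1 : ai < t.length)
    (h3 : bj < (t.getD ai []).length) :
    pvBStep (ai : Int) (bj : Int) t ((0 : Int), (0 : Int)) = pvBNeg t ai bj := by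
  simp only [pvBStep, add_zero, Int.toNat_natCast]
  rw [if_pos ⟨by omega, by omega, by omega, by omega⟩]

theorem pvBStep_up (t : List (List Int)) (ai bj : Nat) (hai : ai < t.length)
    (hup : 0 < ai → bj < (t.getD (ai - 1) []).length) :
    pvBStep (ai : Int) (bj : Int) t ((-1 : Int), (0 : Int)) =
      if ai ≠ 0 then pvBNeg t (ai - 1) bj else t := by
  simp only [pvBStep, add_zero, Int.toNat_natCast,
    (show ((ai : Int) + -1).toNat = ai - 1 by omega)]
  by_cases h : ai = 0
  · rw [if_neg (by rintro ⟨w, -⟩; omega), if_neg (by omega)]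
  · rw [if_pos ⟨by omega, by omega, by omega, by have := hup (by omega); omega⟩, if_pos h]

theorem pvBStep_down (t : List (List Int)) (ai bj : Nat)
    (hdn : (ai : Int) < (t.length : Int) - 1 → bj < (t.getD (ai + 1) []).length) :
    pvBStep (ai : Int) (bj : Int) t ((1 : Int), (0 : Int)) =
      if (ai : Int) < (t.length : Int) - 1 then pvBNeg t (ai + 1) bj else t := by
  simp only [pvBStep, add_zero, Int.toNat_natCast,
    (show ((ai : Int) + 1).toNat = ai + 1 by omega)]
  by_cases h : (ai : Int) < (t.length : Int) - 1
  · rw [if_pos ⟨by omega, by omega, by omega, by have := hdn h; omega⟩, if_pos h]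
  · rw [if_neg (by rintro ⟨-, w, -⟩; omega), if_neg h]

theorem pvBStep_left (t : List (List Int)) (ai bj : Nat) (hai : ai < t.length)
    (hbj : bj < (t.getD ai []).length) :
    pvBStep (ai : Int) (bj : Int) t ((0 : Int), (-1 : Int)) =
      if bj ≠ 0 then pvBNeg t ai (bj - 1) else t := by
  simp only [pvBStep, add_zero, Int.toNat_natCast,
    (show ((bj : Int) + -1).toNat = bj - 1 by omega)]
  by_cases h : bj = 0
  · rw [if_neg (by rintro ⟨-, -, w, -⟩; omega), if_neg (by omega)]
  · rw [if_pos ⟨by omega, by omega, by omega, by omega⟩, if_pos h]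

theorem pvBStep_right (t : List (List Int)) (ai bj : Nat) (hai : ai < t.length) :
    pvBStep (ai : Int) (bj : Int) t ((0 : Int), (1 : Int)) =
      if (bj : Int) < ((t.getD ai []).length : Int) - 1 then pvBNeg t ai (bj + 1) else t := by
  simp only [pvBStep, add_zero, Int.toNat_natCast,
    (show ((bj : Int) + 1).toNat = bj + 1 by omega)]
  by_cases h : (bj : Int) < ((t.getD ai []).length : Int) - 1
  · rw [if_pos ⟨by omega, by omega, by omega, by omega⟩, if_pos h]
  · rw [if_neg (by rintro ⟨-, -, -, w⟩; omega), if_neg h]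

-- ===== VERDICT (by name: the statement is the Claim_ definition above) =====
theorem clickOnPosition_spec : Claim_equal_clickOnPosition := by
  rintro ⟨a, b⟩ state _ hpre
  unfold Pre_clickOnPosition at hpre
  unfold Spec_clickOnPosition clickOnPosition clickOnPosition_alt
  simp only [List.map_id']
  by_cases hB : 0 ≤ a ∧ a < (state.length : Int) ∧ 0 ≤ b ∧ b < ((state.getD a.toNat []).length : Int)
  case neg =>
    rw [if_neg hB]
    refine foldl_range_id _ _ _ ?_
    intro ts i hi
    refine foldl_range_id _ _ _ ?_
    intro ts j hj
    rw [if_neg]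
    rintro ⟨e1, e2⟩
    apply hB
    have hti : a.toNat = i := by omega
    rw [hti]
    refine ⟨by omega, by omega, by omega, by omega⟩
  case pos =>
    obtain ⟨h0, h1, h2, h3⟩ := hB
    obtain ⟨ai, rfl⟩ := Int.eq_ofNat_of_zero_le h0
    obtain ⟨bj, rfl⟩ := Int.eq_ofNat_of_zero_le h2
    simp only [Int.toNat_natCast] at h1 h3 hpre ⊢
    obtain ⟨hup, hdn⟩ := hpre ⟨by omega, by omega, by omega, by omega⟩
    rw [if_pos (⟨by omega, by omega, by omega, by omega⟩ :
      (0 : Int) ≤ (ai : Int) ∧ (ai : Int) < (state.length : Int) ∧ (0 : Int) ≤ (bj : Int) ∧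
        (bj : Int) < ((state.getD ai []).length : Int))]
    rw [foldl_range_single state.length ai (by omega) _ _
      (fun ts i hi hine => foldl_range_id _ _ _
        (fun ts j hj => if_neg (by rintro ⟨e1, e2⟩; exact hine (by omega))))]
    rw [foldl_range_single (state.getD ai []).length bj (by omega) _ _
      (fun ts j hj hjne => if_neg (by rintro ⟨e1, e2⟩; exact hjne (by omega)))]
    rw [if_pos (⟨by omega, by omega⟩ : (ai : Int) = ((ai : Int) : Int) ∧ (bj : Int) = ((bj : Int) : Int))]
    simp only [pvASet_eq_pvBNeg, List.foldl_cons, List.foldl_nil]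
    rw [pvBStep_center state ai bj (by omega) (by omega)]
    rw [pvBStep_up (pvBNeg state ai bj) ai bj (by rw [len_pvBNeg]; omega)
      (fun hp => by rw [row_len_pvBNeg]; have := hup (by omega); omega)]
    set t2 := if ai ≠ 0 then pvBNeg (pvBNeg state ai bj) (ai - 1) bj else pvBNeg state ai bj with ht2
    have hl2 : t2.length = state.length := by rw [ht2]; split_ifs <;> simp only [len_pvBNeg]
    have hr2 : ∀ k, (t2.getD k []).length = (state.getD k []).length := by
      intro k; rw [ht2]; split_ifs <;> simp only [row_len_pvBNeg]
    rw [pvBStep_down t2 ai bj (fun hp => by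
      rw [hr2]; rw [hl2] at hp; have := hdn hp; omega), hl2]
    set t3 := if (ai : Int) < (state.length : Int) - 1 then pvBNeg t2 (ai + 1) bj else t2 with ht3
    have hl3 : t3.length = state.length := by rw [ht3]; split_ifs <;> simp only [len_pvBNeg, hl2]
    have hr3 : ∀ k, (t3.getD k []).length = (state.getD k []).length := by
      intro k; rw [ht3]; split_ifs <;> simp only [row_len_pvBNeg, hr2]
    rw [pvBStep_left t3 ai bj (by rw [hl3]; omega) (by rw [hr3]; omega)]
    set t4 := if bj ≠ 0 then pvBNeg t3 ai (bj - 1) else t3 with ht4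
    have hr4 : ∀ k, (t4.getD k []).length = (state.getD k []).length := by
      intro k; rw [ht4]; split_ifs <;> simp only [row_len_pvBNeg, hr3]
    have hl4 : t4.length = state.length := by rw [ht4]; split_ifs <;> simp only [len_pvBNeg, hl3]
    rw [pvBStep_right t4 ai bj (by rw [hl4]; omega), hr4]
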